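-- pv_equiv track=rewrite | github.com/Agentic-Environmental-Engineering/GymVerse | gem/gem/envs/RLVE/klo_blocks_env.py | _compute_reference_answer
-- ===== SOURCE A (Python) =====
-- from typing import Any, Optional, SupportsFloat, Tuple, List
--
-- def _compute_reference_answer(A: List[int], K: int) -> int:
--     """Compute the reference answer using the prefix-sum and monotonic stack method."""
--     N = len(A)
--     b = [0] * (N + 1)
--     stack: List[int] = []
--     ans = 0
--
--     # Forward pass: build b[], track any prefix with non-negative sum and maintain strictly decreasing stack
--     for i in range(1, N + 1):
--         b[i] = b[i - 1] + A[i - 1] - K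
--         if b[i] >= 0:
--             ans = i
--         if not stack or b[i] < b[stack[-1]]:
--             stack.append(i)
--
--     # Backward pass: match later indices with earlier minima in the stack
--     for i in range(N, 0, -1):
--         while stack and b[i] - b[stack[-1]] >= 0:
--             ans = max(ans, i - stack[-1])
--             stack.pop()
--
--     return ans
-- ===== SOURCE B (Python) =====
-- def _compute_reference_answer(A, K):
--     """Brute force over prefix sums: longest i<j with b[j]-b[i] >= 0."""
--     N = len(A)
--     b = [0] * (N + 1)
--     for i in range(1, N + 1):
--         b[i] = b[i - 1] + A[i - 1] - K
--     ans = 0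
--     for i in range(N + 1):
--         for j in range(i + 1, N + 1):
--             if b[j] - b[i] >= 0:
--                 ans = max(ans, j - i)
--     return ans
-- ===== Notes on version B (the rewrite author's own statement) =====
-- stated objective: simpler
-- what changed: Replaced the monotonic-stack forward/backward passes over prefix sums by a plain nested scan over all prefix-sum pairs (i,j), returning the largest j-i with b[j]-b[i] >= 0.
import Mathlib
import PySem

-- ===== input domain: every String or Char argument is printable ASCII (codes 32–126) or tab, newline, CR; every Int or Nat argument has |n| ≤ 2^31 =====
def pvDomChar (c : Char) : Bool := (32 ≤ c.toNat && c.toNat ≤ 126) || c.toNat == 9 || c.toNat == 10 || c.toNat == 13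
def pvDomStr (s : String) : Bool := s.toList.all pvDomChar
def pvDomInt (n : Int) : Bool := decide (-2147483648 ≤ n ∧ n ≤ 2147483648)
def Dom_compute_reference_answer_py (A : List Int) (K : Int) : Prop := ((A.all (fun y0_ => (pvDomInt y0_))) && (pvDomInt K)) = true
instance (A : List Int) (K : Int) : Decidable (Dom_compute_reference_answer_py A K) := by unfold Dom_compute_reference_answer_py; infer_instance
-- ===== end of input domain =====

-- B replaces A's prefix-sum + monotonic-stack passes by a plain nested scan over all
-- prefix-sum pairs (simpler, same return value; B is O(n^2) where A is O(n)).

-- ===== PORT A =====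
-- forward-pass body: state (b, stack, ans); b grows by one entry per step (Python writes b[i])
def paStep (A : List Int) (K : Int) (st : List Int × List Nat × Int) (i : Nat) : List Int × List Nat × Int :=
  let b := st.1
  let stack := st.2.1
  let ans := st.2.2
  let bi := b.getD (i - 1) 0 + A.getD (i - 1) 0 - K
  let b' := b ++ [bi]
  let ans' := if 0 ≤ bi then (i : Int) else ans
  let stack' :=
    match stack with
    | [] => [i]
    | s :: _ => if bi < b'.getD s 0 then i :: stack else stack
  (b', stack', ans')

-- the inner `while stack and b[i] - b[stack[-1]] >= 0` loop (stack head = Python stack top)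
def paWhile (b : List Int) (i : Nat) (stack : List Nat) (ans : Int) : List Nat × Int :=
  match stack with
  | [] => ([], ans)
  | s :: rest =>
      if 0 ≤ b.getD i 0 - b.getD s 0 then paWhile b i rest (max ans ((i : Int) - (s : Int)))
      else (s :: rest, ans)

def compute_reference_answer_py (A : List Int) (K : Int) : Int :=
  let fw := (List.range' 1 A.length).foldl (paStep A K) ([0], [], 0)
  (((List.range' 1 A.length).reverse).foldl (fun st i => paWhile fw.1 i st.1 st.2) (fw.2.1, fw.2.2)).2

-- ===== PORT B =====
def compute_reference_answer_py_alt (A : List Int) (K : Int) : Int :=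
  let N := A.length
  let b := (List.range' 1 N).foldl (fun b i => b ++ [b.getD (i - 1) 0 + A.getD (i - 1) 0 - K]) [0]
  (List.range (N + 1)).foldl (fun ans i =>
    (List.range' (i + 1) (N - i)).foldl (fun ans j =>
      if 0 ≤ b.getD j 0 - b.getD i 0 then max ans ((j : Int) - (i : Int)) else ans) ans) 0

-- ===== PRECONDITION & SPEC =====
def Spec_compute_reference_answer_py (A : List Int) (K : Int) (out : Int) : Prop := out = compute_reference_answer_py_alt A K
instance (A : List Int) (K : Int) (out : Int) : Decidable (Spec_compute_reference_answer_py A K out) := by unfold Spec_compute_reference_answer_py; infer_instance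

-- ===== CLAIM (what is proved, stated in full; the proofs are below) =====
def Claim_equal_compute_reference_answer_py : Prop := ∀ (A : List Int) (K : Int), Dom_compute_reference_answer_py A K → Spec_compute_reference_answer_py A K (compute_reference_answer_py A K)

-- ===== LEMMAS AND PROOFS =====

-- the prefix sums b[i] = sum of (A[t] - K) for t < i, as a function
def bfp (A : List Int) (K : Int) : Nat → Int
  | 0 => 0
  | n + 1 => bfp A K n + A.getD n 0 - K

-- generic facts about Int-valued left folds
theorem gfold_mono {β : Type} (f : Int → β → Int) (l : List β)
    (h : ∀ a x, x ∈ l → a ≤ f a x) : ∀ a, a ≤ l.foldl f a := by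
  induction l with
  | nil => intro a; simp
  | cons x t ih =>
    intro a
    simp only [List.foldl_cons]
    exact le_trans (h a x (by simp)) (ih (fun a y hy => h a y (by simp [hy])) (f a x))

theorem gfold_mem {β : Type} (f : Int → β → Int) (l : List β) (x : β) (c : Int)
    (hmem : x ∈ l) (hc : ∀ a, c ≤ f a x) (h : ∀ a y, y ∈ l → a ≤ f a y) :
    ∀ a, c ≤ l.foldl f a := by
  induction l with
  | nil => exact absurd hmem (by simp)
  | cons z t ih =>
    intro a
    simp only [List.foldl_cons]
    rcases List.mem_cons.mp hmem with rfl | hx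
    · exact le_trans (hc a) (gfold_mono f t (fun a y hy => h a y (by simp [hy])) _)
    · exact ih hx (fun a y hy => h a y (by simp [hy])) _

theorem gfold_cases {β : Type} (f : Int → β → Int) (l : List β) (Q : Int → Prop)
    (h : ∀ a x, x ∈ l → f a x = a ∨ Q (f a x)) :
    ∀ a, l.foldl f a = a ∨ Q (l.foldl f a) := by
  induction l with
  | nil => intro a; left; simp
  | cons z t ih =>
    intro a
    simp only [List.foldl_cons]
    rcases h a z (by simp) with he | hq
    · rw [he]; exact ih (fun a y hy => h a y (by simp [hy])) a
    · rcases ih (fun a y hy => h a y (by simp [hy])) (f a z) with he2 | hq2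
      · rw [he2]; right; exact hq
      · right; exact hq2

-- the prefix list both ports build equals the map of bfp
theorem blist_eq (A : List Int) (K : Int) : ∀ n,
    (List.range' 1 n).foldl (fun b i => b ++ [b.getD (i - 1) 0 + A.getD (i - 1) 0 - K]) [0]
      = (List.range (n + 1)).map (bfp A K) := by
  intro n
  induction n with
  | zero => simp [bfp]
  | succ n ih =>
    rw [List.range'_1_concat, List.foldl_append, ih]
    simp only [List.foldl_cons, List.foldl_nil]
    have h1 : 1 + n - 1 = n := by omega
    rw [h1, PySem.List.getD_map_range _ _ _ _ (Nat.lt_succ_self n)]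
    conv_rhs => rw [List.range_succ, List.map_append]
    congr 1

-- B's result expressed through bfp
def bruteF (A : List Int) (K : Int) : Int :=
  (List.range (A.length + 1)).foldl (fun ans i =>
    (List.range' (i + 1) (A.length - i)).foldl (fun ans j =>
      if 0 ≤ bfp A K j - bfp A K i then max ans ((j : Int) - (i : Int)) else ans) ans) 0

theorem alt_eq_bruteF (A : List Int) (K : Int) :
    compute_reference_answer_py_alt A K = bruteF A K := by
  unfold compute_reference_answer_py_alt bruteF
  dsimp only
  rw [blist_eq]
  apply PySem.List.foldl_congr_mem
  intro acc i hi
  apply PySem.List.foldl_congr_mem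
  intro acc2 j hj
  have hiN : i < A.length + 1 := List.mem_range.mp hi
  have hjN : j < A.length + 1 := by
    have := (List.mem_range'_1.mp hj).2
    omega
  rw [PySem.List.getD_map_range _ _ _ _ hiN, PySem.List.getD_map_range _ _ _ _ hjN]

theorem innerstep_mono (A : List Int) (K : Int) (i : Nat) :
    ∀ (a : Int) (j : Nat),
      a ≤ (if 0 ≤ bfp A K j - bfp A K i then max a ((j : Int) - (i : Int)) else a) := by
  intro a j
  split
  · exact le_max_left _ _
  · exact le_refl a

theorem inner_mono (A : List Int) (K : Int) (i : Nat) :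
    ∀ (a : Int) (l : List Nat),
      a ≤ l.foldl (fun ans j =>
        if 0 ≤ bfp A K j - bfp A K i then max ans ((j : Int) - (i : Int)) else ans) a := by
  intro a l
  exact gfold_mono _ _ (fun a j _ => innerstep_mono A K i a j) a

theorem bruteF_nonneg (A : List Int) (K : Int) : 0 ≤ bruteF A K := by
  unfold bruteF
  exact gfold_mono _ _ (fun a i _ => inner_mono A K i a _) 0

theorem bruteF_ge (A : List Int) (K : Int) (i j : Nat) (hij : i < j) (hjN : j ≤ A.length)
    (h : 0 ≤ bfp A K j - bfp A K i) : (j : Int) - (i : Int) ≤ bruteF A K := by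
  unfold bruteF
  apply gfold_mem _ _ i ((j : Int) - (i : Int))
  · exact List.mem_range.mpr (by omega)
  · intro a
    apply gfold_mem _ _ j ((j : Int) - (i : Int))
    · exact List.mem_range'_1.mpr (by omega)
    · intro a2
      rw [if_pos h]
      exact le_max_right _ _
    · exact fun a j _ => innerstep_mono A K i a j
  · exact fun a i _ => inner_mono A K i a _

theorem bruteF_cases (A : List Int) (K : Int) :
    bruteF A K = 0 ∨ ∃ i j : Nat, i < j ∧ j ≤ A.length ∧ 0 ≤ bfp A K j - bfp A K i ∧
      bruteF A K = (j : Int) - (i : Int) := by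
  unfold bruteF
  refine gfold_cases _ _
    (fun r => ∃ i j : Nat, i < j ∧ j ≤ A.length ∧ 0 ≤ bfp A K j - bfp A K i ∧ r = (j : Int) - (i : Int))
    ?_ 0
  intro a i hi
  refine gfold_cases _ _
    (fun r => ∃ i' j : Nat, i' < j ∧ j ≤ A.length ∧ 0 ≤ bfp A K j - bfp A K i' ∧ r = (j : Int) - (i' : Int))
    ?_ a
  intro a2 j hj
  have hiN : i < A.length + 1 := List.mem_range.mp hi
  have hjr := List.mem_range'_1.mp hj
  by_cases hc : 0 ≤ bfp A K j - bfp A K i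
  · rw [if_pos hc]
    rcases max_choice a2 ((j : Int) - (i : Int)) with he | he
    · left; exact he
    · right; exact ⟨i, j, by omega, by omega, hc, he⟩
  · left; rw [if_neg hc]

-- invariants of A's forward pass
def StackBound (N : Nat) (stack : List Nat) : Prop := ∀ s ∈ stack, 1 ≤ s ∧ s ≤ N
def StackSorted (A : List Int) (K : Int) (stack : List Nat) : Prop :=
  stack.Pairwise (fun a b => b < a ∧ bfp A K a < bfp A K b)
def StackDom (A : List Int) (K : Int) (n : Nat) (stack : List Nat) : Prop :=
  ∀ t, 1 ≤ t → t ≤ n → ∃ s ∈ stack, s ≤ t ∧ bfp A K s ≤ bfp A K t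
def AnsFInv (A : List Int) (K : Int) (n : Nat) (ans : Int) : Prop :=
  (∀ j : Nat, 1 ≤ j → j ≤ n → 0 ≤ bfp A K j → (j : Int) ≤ ans) ∧
  (ans = 0 ∨ ∃ j : Nat, 1 ≤ j ∧ j ≤ n ∧ 0 ≤ bfp A K j ∧ ans = (j : Int))

theorem fwd_inv (A : List Int) (K : Int) : ∀ n,
    ((List.range' 1 n).foldl (paStep A K) ([0], [], 0)).1 = (List.range (n + 1)).map (bfp A K) ∧
    StackBound n ((List.range' 1 n).foldl (paStep A K) ([0], [], 0)).2.1 ∧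
    StackSorted A K ((List.range' 1 n).foldl (paStep A K) ([0], [], 0)).2.1 ∧
    StackDom A K n ((List.range' 1 n).foldl (paStep A K) ([0], [], 0)).2.1 ∧
    AnsFInv A K n ((List.range' 1 n).foldl (paStep A K) ([0], [], 0)).2.2 := by
  intro n
  induction n with
  | zero =>
    refine ⟨by simp [bfp], ?_, ?_, ?_, ?_⟩
    · intro s hs; simp at hs
    · exact List.Pairwise.nil
    · intro t h1 h2; omega
    · exact ⟨by intro j h1 h2 _; omega, Or.inl rfl⟩
  | succ n ih =>
    obtain ⟨hb, hbd, hsort, hdom, hans⟩ := ih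
    have key : (List.range' 1 (n + 1)).foldl (paStep A K) ([0], [], 0)
        = paStep A K ((List.range' 1 n).foldl (paStep A K) ([0], [], 0)) (n + 1) := by
      rw [List.range'_1_concat, Nat.add_comm 1 n, List.foldl_append]; rfl
    rw [key]
    set st := (List.range' 1 n).foldl (paStep A K) ([0], [], 0) with hst
    have hbn : st.1.getD n 0 = bfp A K n := by
      rw [hb]; exact PySem.List.getD_map_range _ _ _ _ (Nat.lt_succ_self n)
    have hbi : st.1.getD (n + 1 - 1) 0 + A.getD (n + 1 - 1) 0 - K = bfp A K (n + 1) := by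
      rw [show n + 1 - 1 = n from by omega, hbn]; simp [bfp]
    have hA1 : (paStep A K st (n + 1)).1 = st.1 ++ [bfp A K (n + 1)] := by
      rw [← hbi]; rfl
    have hA3 : (paStep A K st (n + 1)).2.2
        = if 0 ≤ bfp A K (n + 1) then ((n + 1 : Nat) : Int) else st.2.2 := by
      rw [← hbi]; rfl
    have hb' : (paStep A K st (n + 1)).1 = (List.range (n + 1 + 1)).map (bfp A K) := by
      rw [hA1, hb]
      conv_rhs => rw [List.range_succ, List.map_append]
      rfl
    have hans' : AnsFInv A K (n + 1) (paStep A K st (n + 1)).2.2 := by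
      rw [hA3]
      by_cases hpos : 0 ≤ bfp A K (n + 1)
      · rw [if_pos hpos]
        constructor
        · intro j h1 h2 _; push_cast; omega
        · right; exact ⟨n + 1, by omega, by omega, hpos, by push_cast; ring⟩
      · rw [if_neg hpos]
        constructor
        · intro j h1 h2 hj
          rcases Nat.lt_or_ge j (n + 1) with hlt | hge
          · exact hans.1 j h1 (by omega) hj
          · have hj' : j = n + 1 := by omega
            rw [hj'] at hj
            exact absurd hj hpos
        · rcases hans.2 with h0 | ⟨j, hj1, hj2, hj3, hj4⟩
          · left; exact h0
          · right; exact ⟨j, hj1, by omega, hj3, hj4⟩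
    have hA2g : (paStep A K st (n + 1)).2.1 = (match st.2.1 with
        | [] => [n + 1]
        | s :: _ => if st.1.getD (n + 1 - 1) 0 + A.getD (n + 1 - 1) 0 - K
            < (st.1 ++ [st.1.getD (n + 1 - 1) 0 + A.getD (n + 1 - 1) 0 - K]).getD s 0
          then (n + 1) :: st.2.1 else st.2.1) := rfl
    rcases hstk : st.2.1 with _ | ⟨s, rest⟩
    · -- Python stack empty: only possible right at the start (n = 0)
      have hn0 : n = 0 := by
        by_contra hne
        obtain ⟨x, hx, -⟩ := hdom 1 (le_refl 1) (by omega)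
        rw [hstk] at hx
        simp at hx
      rw [hstk] at hA2g
      simp only [] at hA2g
      refine ⟨hb', ?_, ?_, ?_, hans'⟩
      · intro x hx
        rw [hA2g] at hx
        simp at hx
        omega
      · rw [hA2g]; exact List.pairwise_singleton _ _
      · intro t h1 h2
        rw [hA2g]
        refine ⟨n + 1, by simp, by omega, ?_⟩
        rw [show t = n + 1 from by omega]
    · -- nonempty stack: push iff bfp (n+1) < bfp s
      have hsN : s ≤ n := (hbd s (by rw [hstk]; simp)).2
      have hgets : (st.1 ++ [bfp A K (n + 1)]).getD s 0 = bfp A K s := by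
        rw [show st.1 ++ [bfp A K (n + 1)] = (List.range (n + 1 + 1)).map (bfp A K) from by
          rw [← hA1, hb']]
        exact PySem.List.getD_map_range _ _ _ _ (by omega)
      rw [hstk] at hA2g
      simp only [] at hA2g
      rw [hbi] at hA2g
      rw [hgets] at hA2g
      rw [hstk] at hbd hsort hdom
      refine ⟨hb', ?_, ?_, ?_, hans'⟩
      · intro x hx
        rw [hA2g] at hx
        split at hx
        · rcases List.mem_cons.mp hx with rfl | hx2
          · omega
          · have := hbd x hx2; omega
        · have := hbd x hx; omega
      · rw [hA2g]
        split
        · rename_i hpush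
          refine List.Pairwise.cons ?_ hsort
          intro x hx
          have hxb := hbd x hx
          refine ⟨by omega, ?_⟩
          rcases List.mem_cons.mp hx with rfl | hx2
          · exact hpush
          · have := (List.pairwise_cons.mp hsort).1 x hx2
            exact lt_trans hpush this.2
        · exact hsort
      · intro t h1 h2
        rw [hA2g]
        rcases Nat.lt_or_ge t (n + 1) with hlt | hge
        · obtain ⟨x, hx, hxt, hxb⟩ := hdom t h1 (by omega)
          refine ⟨x, ?_, hxt, hxb⟩
          split
          · exact List.mem_cons_of_mem _ hx
          · exact hx
        · rw [show t = n + 1 from by omega]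
          split
          · rename_i hpush
            exact ⟨n + 1, by simp, by omega, le_refl _⟩
          · rename_i hnp
            exact ⟨s, by simp, by omega, by omega⟩

-- facts about the pop loop, stated over the bfp table
def pwSpec (A : List Int) (K : Int) (i : Nat) : List Nat → Int → List Nat × Int
  | [], ans => ([], ans)
  | s :: rest, ans =>
      if 0 ≤ bfp A K i - bfp A K s then pwSpec A K i rest (max ans ((i : Int) - (s : Int)))
      else (s :: rest, ans)

theorem pwB_eq (A : List Int) (K : Int) (i : Nat) (hi : i ≤ A.length) :
    ∀ (stack : List Nat) (ans : Int), (∀ s ∈ stack, s ≤ A.length) →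
      paWhile ((List.range (A.length + 1)).map (bfp A K)) i stack ans = pwSpec A K i stack ans := by
  intro stack
  induction stack with
  | nil => intro ans _; rfl
  | cons s rest ih =>
    intro ans h
    have hgi : ((List.range (A.length + 1)).map (bfp A K)).getD i 0 = bfp A K i :=
      PySem.List.getD_map_range _ _ _ _ (by omega)
    have hgs : ((List.range (A.length + 1)).map (bfp A K)).getD s 0 = bfp A K s :=
      PySem.List.getD_map_range _ _ _ _ (by have := h s (by simp); omega)
    rw [paWhile, pwSpec, hgi, hgs]
    split
    · exact ih _ (fun x hx => h x (by simp [hx]))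
    · rfl

theorem pw_mono (A : List Int) (K : Int) (i : Nat) : ∀ (stack : List Nat) (ans : Int),
    ans ≤ (pwSpec A K i stack ans).2 := by
  intro stack
  induction stack with
  | nil => intro ans; exact le_refl ans
  | cons s rest ih =>
    intro ans
    rw [pwSpec]
    split
    · exact le_trans (le_max_left _ _) (ih _)
    · exact le_refl ans

theorem pw_suffix (A : List Int) (K : Int) (i : Nat) :
    ∀ (stack : List Nat) (ans : Int),
    ∃ u, stack = u ++ (pwSpec A K i stack ans).1 ∧ ∀ s ∈ u, 0 ≤ bfp A K i - bfp A K s := by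
  intro stack
  induction stack with
  | nil => intro ans; exact ⟨[], rfl, by simp⟩
  | cons s rest ih =>
    intro ans
    rw [pwSpec]
    split
    · rename_i hc
      obtain ⟨u, hu, hpop⟩ := ih (max ans ((i : Int) - (s : Int)))
      refine ⟨s :: u, ?_, ?_⟩
      · rw [List.cons_append, ← hu]
      · intro x hx
        rcases List.mem_cons.mp hx with rfl | hx2
        · exact hc
        · exact hpop x hx2
    · exact ⟨[], rfl, by simp⟩

theorem pw_cases (A : List Int) (K : Int) (i : Nat) :
    ∀ (stack : List Nat) (ans : Int),
    (pwSpec A K i stack ans).2 = ans ∨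
      ∃ s ∈ stack, 0 ≤ bfp A K i - bfp A K s ∧
        (pwSpec A K i stack ans).2 = (i : Int) - (s : Int) := by
  intro stack
  induction stack with
  | nil => intro ans; left; rfl
  | cons s rest ih =>
    intro ans
    rw [pwSpec]
    split
    · rename_i hc
      rcases ih (max ans ((i : Int) - (s : Int))) with he | ⟨x, hx, hcx, he⟩
      · rw [he]
        rcases max_choice ans ((i : Int) - (s : Int)) with h2 | h2
        · left; exact h2
        · right; exact ⟨s, by simp, hc, h2⟩
      · right; exact ⟨x, by simp [hx], hcx, he⟩
    · left; rfl

theorem pw_reach (A : List Int) (K : Int) (i : Nat) (s : Nat) :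
    ∀ (u rest : List Nat) (ans : Int),
    (∀ x ∈ u, 0 ≤ bfp A K i - bfp A K x) → 0 ≤ bfp A K i - bfp A K s →
    (i : Int) - (s : Int) ≤ (pwSpec A K i (u ++ s :: rest) ans).2 := by
  intro u
  induction u with
  | nil =>
    intro rest ans _ hs
    rw [List.nil_append, pwSpec, if_pos hs]
    exact le_trans (le_max_right _ _) (pw_mono A K i rest _)
  | cons x u' ih =>
    intro rest ans hu hs
    rw [List.cons_append, pwSpec, if_pos (hu x (by simp))]
    exact ih rest _ (fun y hy => hu y (by simp [hy])) hs

-- invariant of A's backward pass after processing the iterations above n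
def BInv (A : List Int) (K : Int) (stack0 : List Nat) (ansF : Int) (n : Nat)
    (st : List Nat × Int) : Prop :=
  (∃ pre, stack0 = pre ++ st.1) ∧
  (∀ j : Nat, n < j → j ≤ A.length → ∀ s ∈ stack0, bfp A K s ≤ bfp A K j →
      (j : Int) - (s : Int) ≤ st.2) ∧
  (∀ s ∈ stack0, s ∉ st.1 → ∃ j : Nat, n < j ∧ j ≤ A.length ∧ bfp A K s ≤ bfp A K j) ∧
  ansF ≤ st.2 ∧
  (st.2 = ansF ∨ ∃ s j : Nat, 1 ≤ s ∧ s ≤ A.length ∧ 1 ≤ j ∧ j ≤ A.length ∧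
      bfp A K s ≤ bfp A K j ∧ st.2 = (j : Int) - (s : Int))

theorem bwd_inv (A : List Int) (K : Int) (stack0 : List Nat) (ansF : Int)
    (hbd0 : StackBound A.length stack0) (hsort0 : StackSorted A K stack0) :
    ∀ m, m ≤ A.length →
      BInv A K stack0 ansF (A.length - m)
        (((List.range' (A.length - m + 1) m).reverse).foldl
          (fun st i => paWhile ((List.range (A.length + 1)).map (bfp A K)) i st.1 st.2)
          (stack0, ansF)) := by
  intro m
  induction m with
  | zero =>
    intro _
    refine ⟨⟨[], rfl⟩, ?_, ?_, le_refl _, Or.inl rfl⟩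
    · intro j hj1 hj2 s hs hbs; omega
    · intro s hs hns; exact absurd hs hns
  | succ m ih =>
    intro hm
    obtain ⟨⟨pre, hpre⟩, hI2, hI3, hI4, hI5⟩ := ih (by omega)
    have hlist : (List.range' (A.length - (m + 1) + 1) (m + 1)).reverse
        = (List.range' (A.length - m + 1) m).reverse ++ [A.length - m] := by
      rw [show A.length - (m + 1) + 1 = A.length - m from by omega, List.range'_succ,
        List.reverse_cons]
    rw [hlist, List.foldl_append]
    simp only [List.foldl_cons, List.foldl_nil]
    set stp := ((List.range' (A.length - m + 1) m).reverse).foldl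
      (fun st i => paWhile ((List.range (A.length + 1)).map (bfp A K)) i st.1 st.2)
      (stack0, ansF) with hstp
    set i := A.length - m with hi
    have hi1 : 1 ≤ i := by omega
    have hiN : i ≤ A.length := by omega
    have hbdstk : ∀ x ∈ stp.1, x ≤ A.length := by
      intro x hx
      exact (hbd0 x (by rw [hpre]; exact List.mem_append_right _ hx)).2
    rw [pwB_eq A K i hiN stp.1 stp.2 hbdstk]
    obtain ⟨u, hu, hupop⟩ := pw_suffix A K i stp.1 stp.2
    have hmono := pw_mono A K i stp.1 stp.2
    refine ⟨⟨pre ++ u, by rw [hpre, List.append_assoc]; exact congrArg (pre ++ ·) hu⟩, ?_, ?_,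
      le_trans hI4 hmono, ?_⟩
    · -- longest-pair bound, extended to the new iteration index i
      intro j hj1 hj2 s hs hbs
      rcases Nat.lt_or_ge i j with hgt | hle
      · exact le_trans (hI2 j (by omega) hj2 s hs hbs) hmono
      · have hji : j = i := by omega
        rw [hji] at hbs ⊢
        by_cases hsin : s ∈ stp.1
        · obtain ⟨u1, rest, hdec⟩ := List.mem_iff_append.mp hsin
          have hpw : (stp.1).Pairwise (fun a b => b < a ∧ bfp A K a < bfp A K b) := by
            have hpw0 : stack0.Pairwise (fun a b => b < a ∧ bfp A K a < bfp A K b) := hsort0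
            rw [hpre] at hpw0
            exact (List.pairwise_append.mp hpw0).2.1
          have hpair : ∀ x ∈ u1, 0 ≤ bfp A K i - bfp A K x := by
            intro x hx
            rw [hdec] at hpw
            have := (List.pairwise_append.mp hpw).2.2 x hx s (by simp)
            have hxs : bfp A K x < bfp A K s := this.2
            omega
          rw [hdec]
          exact pw_reach A K i s u1 rest stp.2 hpair (by omega)
        · obtain ⟨j', hj'1, hj'2, hj'3⟩ := hI3 s hs hsin
          have hb2 := le_trans (hI2 j' hj'1 hj'2 s hs hj'3) hmono
          have hle2 : (i : Int) - (s : Int) ≤ (j' : Int) - (s : Int) := by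
            have : i < j' := by omega
            have : (i : Int) < (j' : Int) := by exact_mod_cast this
            omega
          exact le_trans hle2 hb2
    · -- every popped index was popped for a reason
      intro s hs hnotin
      by_cases hsin : s ∈ stp.1
      · have hsu : s ∈ u := by
          rw [hu] at hsin
          rcases List.mem_append.mp hsin with h | h
          · exact h
          · exact absurd h hnotin
        exact ⟨i, by omega, hiN, by have := hupop s hsu; omega⟩
      · obtain ⟨j', hj'1, hj'2, hj'3⟩ := hI3 s hs hsin
        exact ⟨j', by omega, hj'2, hj'3⟩
    · -- shape of the answer
      rcases pw_cases A K i stp.1 stp.2 with he | ⟨s, hsmem, hcond, he⟩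
      · rw [he]; exact hI5
      · right
        have hs0 : s ∈ stack0 := by rw [hpre]; exact List.mem_append_right _ hsmem
        have hsb := hbd0 s hs0
        exact ⟨s, i, hsb.1, hsb.2, hi1, hiN, by omega, he⟩

theorem portA_eq_bruteF (A : List Int) (K : Int) :
    compute_reference_answer_py A K = bruteF A K := by
  obtain ⟨hb, hbd, hsort, hdom, hans⟩ := fwd_inv A K A.length
  unfold compute_reference_answer_py
  dsimp only
  set fw := (List.range' 1 A.length).foldl (paStep A K) ([0], [], 0) with hfw
  have hstep : (fun (st : List Nat × Int) (i : Nat) => paWhile fw.1 i st.1 st.2)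
      = fun st i => paWhile ((List.range (A.length + 1)).map (bfp A K)) i st.1 st.2 := by
    funext st i
    rw [hb]
  rw [hstep]
  have hbwd := bwd_inv A K fw.2.1 fw.2.2 hbd hsort A.length (le_refl _)
  rw [Nat.sub_self] at hbwd
  obtain ⟨-, hI2, -, hI4, hI5⟩ := hbwd
  apply le_antisymm
  · rcases hI5 with he | ⟨s, j, hs1, hs2, hj1, hj2, hbs, he⟩
    · rw [he]
      rcases hans.2 with h0 | ⟨j, hj1, hj2, hj3, hj4⟩
      · rw [h0]; exact bruteF_nonneg A K
      · rw [hj4]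
        have := bruteF_ge A K 0 j (by omega) hj2 (by simpa [bfp] using hj3)
        simpa using this
    · rw [he]
      rcases Nat.lt_or_ge s j with hlt | hge
      · exact bruteF_ge A K s j hlt hj2 (by omega)
      · have hd : (j : Int) - (s : Int) ≤ 0 := by
          have : (j : Int) ≤ (s : Int) := by exact_mod_cast hge
          omega
        exact le_trans hd (bruteF_nonneg A K)
  · rcases bruteF_cases A K with h0 | ⟨i, j, hij, hjN, hcond, he⟩
    · rw [h0]
      have h0F : (0 : Int) ≤ fw.2.2 := by
        rcases hans.2 with h | ⟨j, _, _, _, hj4⟩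
        · rw [h]
        · rw [hj4]; exact_mod_cast Nat.zero_le j
      exact le_trans h0F hI4
    · rw [he]
      rcases Nat.eq_zero_or_pos i with hi0 | hip
      · subst hi0
        have hjf : (j : Int) ≤ fw.2.2 := hans.1 j (by omega) hjN (by simpa [bfp] using hcond)
        have := le_trans hjf hI4
        simpa using this
      · obtain ⟨s, hsmem, hsle, hsbf⟩ := hdom i hip (by omega)
        have hfin := hI2 j (by omega) hjN s hsmem (by omega)
        have hcast : (j : Int) - (i : Int) ≤ (j : Int) - (s : Int) := by
          have : (s : Int) ≤ (i : Int) := by exact_mod_cast hsle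
          omega
        exact le_trans hcast hfin

-- ===== VERDICT (by name: the statement is the Claim_ definition above) =====
theorem compute_reference_answer_py_spec : Claim_equal_compute_reference_answer_py := by
  intro A K _
  unfold Spec_compute_reference_answer_py
  rw [alt_eq_bruteF, portA_eq_bruteF]
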